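-- pv_equiv track=rewrite | github.com/fstandhartinger/chutes-bench-runner | backend/app/benchmarks/adapters/scicode.py | _process_problem_steps
-- ===== SOURCE A (Python) =====
-- from typing import Any, AsyncIterator, Optional
--
-- def _process_problem_steps(
--
--     sub_steps: list[dict[str, Any]],
--     num_steps: int,
--     previous_llm_code: list[Optional[str]],
--     with_background: bool,
-- ) -> tuple[str, str, str]:
--     output_lines: list[str] = []
--     next_step: list[str] = []
--     previous_code: list[str] = []
--     for idx in range(num_steps - 1):
--         step = sub_steps[idx]
--         step_text = step.get("step_description_prompt", "")
--         if with_background and step.get("step_background"):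
--             step_text = f"{step_text}\n{step.get('step_background')}"
--         output_lines.append(step_text)
--         output_lines.append(previous_llm_code[idx] or "")
--         previous_code.append(previous_llm_code[idx] or "")
--         output_lines.append("------")
--
--     current = sub_steps[num_steps - 1]
--     current_text = current.get("step_description_prompt", "")
--     if with_background and current.get("step_background"):
--         current_text = f"{current_text}\n{current.get('step_background')}"
--     next_step.append(current_text)
--     function_header = current.get("function_header", "")
--     return_line = current.get("return_line", "")
--     next_step.append(f"{function_header}\n\n{return_line}")
--
--     output_str = "\n\n".join(output_lines[:-1]) if output_lines else ""
--     next_step_str = "\n\n".join(next_step)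
--     previous_code_str = "\n".join(previous_code)
--     return output_str, next_step_str, previous_code_str
-- ===== SOURCE B (Python) =====
-- def _step_text(step, with_background):
--     text = step.get("step_description_prompt", "")
--     if with_background and step.get("step_background"):
--         text = f"{text}\n{step.get('step_background')}"
--     return text
--
--
-- def _walk(steps, codes, with_background):
--     """Recursively render the earlier steps: returns (output_str, previous_code_str)."""
--     if not steps:
--         return "", ""
--     code = codes[0] or ""
--     block = f"{_step_text(steps[0], with_background)}\n\n{code}"
--     if len(steps) == 1:
--         return block, code
--     out_rest, prev_rest = _walk(steps[1:], codes[1:], with_background)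
--     return f"{block}\n\n------\n\n{out_rest}", f"{code}\n{prev_rest}"
--
--
-- def _process_problem_steps(sub_steps, num_steps, previous_llm_code, with_background):
--     k = num_steps - 1
--     if k < 0:
--         k = 0
--     output_str, previous_code_str = _walk(sub_steps[:k], previous_llm_code[:k], with_background)
--     current = sub_steps[num_steps - 1]
--     next_step_str = (f"{_step_text(current, with_background)}\n\n"
--                      f"{current.get('function_header', '')}\n\n{current.get('return_line', '')}")
--     return output_str, next_step_str, previous_code_str
-- ===== Notes on version B (the rewrite author's own statement) =====
-- stated objective: alternative
-- what changed: B replaces A's index-driven loop that appends interleaved lines plus a trailing "------" sentinel into one flat list (later sliced with [:-1] and joined) by a structural recursion over the earlier steps that builds the two result strings directly, gluing separators between the head block and the recursively rendered tail, with no intermediate line list and no join/slice.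
import Mathlib
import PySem

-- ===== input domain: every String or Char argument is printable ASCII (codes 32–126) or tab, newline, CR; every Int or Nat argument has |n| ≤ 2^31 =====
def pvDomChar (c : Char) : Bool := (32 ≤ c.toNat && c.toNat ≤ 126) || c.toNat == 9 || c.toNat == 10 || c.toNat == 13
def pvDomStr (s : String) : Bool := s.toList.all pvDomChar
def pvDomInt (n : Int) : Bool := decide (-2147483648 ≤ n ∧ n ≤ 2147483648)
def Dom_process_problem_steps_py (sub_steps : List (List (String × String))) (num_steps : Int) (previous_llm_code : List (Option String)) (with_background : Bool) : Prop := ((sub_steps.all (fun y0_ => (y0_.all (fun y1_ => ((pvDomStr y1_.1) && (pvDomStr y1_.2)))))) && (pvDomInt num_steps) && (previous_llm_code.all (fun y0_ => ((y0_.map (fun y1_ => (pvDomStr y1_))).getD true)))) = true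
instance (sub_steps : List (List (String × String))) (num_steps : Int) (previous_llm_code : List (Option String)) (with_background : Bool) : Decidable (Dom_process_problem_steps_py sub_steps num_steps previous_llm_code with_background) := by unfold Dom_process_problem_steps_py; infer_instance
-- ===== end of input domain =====

-- B replaces A's flat interleaved line list with trailing "------" sentinel, drop-last slice and
-- join by a structural recursion over the earlier steps that glues the result strings directly
-- (objective: alternative decomposition, same cost).

-- ===== PORT A =====
-- Literal port of A. Where Python would raise IndexError the PySem access returns none; those
-- inputs are excluded by Pre_ below, the port's `.getD` default there is never relied upon.
def process_problem_steps_py (sub_steps : List (List (String × String))) (num_steps : Int) (previous_llm_code : List (Option String)) (with_background : Bool) : String × String × String :=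
  let st := (PySem.List.pyRange 0 (num_steps - 1) 1).foldl
    (fun (acc : List String × List String) idx =>
      let step := (PySem.List.pyGet? sub_steps idx).getD []
      let step_text := PySem.Dict.getD (PySem.Dict.mk step) "step_description_prompt" ""
      let step_text :=
        match PySem.Dict.get? (PySem.Dict.mk step) "step_background" with
        | some bg => if with_background && bg ≠ "" then step_text ++ "\n" ++ bg else step_text
        | none => step_text
      let code := ((PySem.List.pyGet? previous_llm_code idx).getD none).getD ""
      (acc.1 ++ [step_text, code, "------"], acc.2 ++ [code]))
    ([], [])
  let output_lines := st.1
  let previous_code := st.2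
  let current := (PySem.List.pyGet? sub_steps (num_steps - 1)).getD []
  let current_text := PySem.Dict.getD (PySem.Dict.mk current) "step_description_prompt" ""
  let current_text :=
    match PySem.Dict.get? (PySem.Dict.mk current) "step_background" with
    | some bg => if with_background && bg ≠ "" then current_text ++ "\n" ++ bg else current_text
    | none => current_text
  let function_header := PySem.Dict.getD (PySem.Dict.mk current) "function_header" ""
  let return_line := PySem.Dict.getD (PySem.Dict.mk current) "return_line" ""
  let next_step := [current_text, function_header ++ "\n\n" ++ return_line]
  let output_str := if output_lines ≠ [] then PySem.Str.join "\n\n" (PySem.List.slice output_lines none (some (-1))) else ""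
  (output_str, PySem.Str.join "\n\n" next_step, PySem.Str.join "\n" previous_code)

-- ===== PORT B =====
def pvStepText (step : List (String × String)) (with_background : Bool) : String :=
  let text := PySem.Dict.getD (PySem.Dict.mk step) "step_description_prompt" ""
  match PySem.Dict.get? (PySem.Dict.mk step) "step_background" with
  | some bg => if with_background && bg ≠ "" then text ++ "\n" ++ bg else text
  | none => text

-- Source B's `_walk`: structural recursion over the earlier steps
def pvWalk (steps : List (List (String × String))) (codes : List (Option String)) (with_background : Bool) : String × String :=
  match steps with
  | [] => ("", "")
  | step :: rest =>
    let code := ((PySem.List.pyGet? codes 0).getD none).getD ""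
    let block := pvStepText step with_background ++ "\n\n" ++ code
    match rest with
    | [] => (block, code)
    | _ :: _ =>
      let r := pvWalk rest (PySem.List.slice codes (some 1) none) with_background
      (block ++ "\n\n------\n\n" ++ r.1, code ++ "\n" ++ r.2)

def process_problem_steps_py_alt (sub_steps : List (List (String × String))) (num_steps : Int) (previous_llm_code : List (Option String)) (with_background : Bool) : String × String × String :=
  let k : Int := num_steps - 1
  let k := if k < 0 then 0 else k
  let r := pvWalk (PySem.List.slice sub_steps none (some k)) (PySem.List.slice previous_llm_code none (some k)) with_background
  let current := (PySem.List.pyGet? sub_steps (num_steps - 1)).getD []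
  let next_step_str := pvStepText current with_background ++ "\n\n" ++
    PySem.Dict.getD (PySem.Dict.mk current) "function_header" "" ++ "\n\n" ++
    PySem.Dict.getD (PySem.Dict.mk current) "return_line" ""
  (r.1, next_step_str, r.2)

-- ===== PRECONDITION & SPEC =====
-- Pre_ = exactly the inputs on which A returns (no IndexError): for num_steps ≥ 1 every loop
-- index and the final index num_steps-1 are in range; for num_steps ≤ 0 the final access is a
-- valid Python negative index into sub_steps.
def Pre_process_problem_steps_py (sub_steps : List (List (String × String))) (num_steps : Int) (previous_llm_code : List (Option String)) (with_background : Bool) : Prop :=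
  (1 ≤ num_steps → num_steps ≤ (sub_steps.length : Int) ∧ num_steps - 1 ≤ (previous_llm_code.length : Int)) ∧
  (num_steps ≤ 0 → 1 - num_steps ≤ (sub_steps.length : Int))
instance (sub_steps : List (List (String × String))) (num_steps : Int) (previous_llm_code : List (Option String)) (with_background : Bool) : Decidable (Pre_process_problem_steps_py sub_steps num_steps previous_llm_code with_background) := by unfold Pre_process_problem_steps_py; infer_instance

def pvWitness_process_problem_steps_py : (List (List (String × String))) × Int × List (Option String) × Bool :=
  ([[("step_description_prompt", "a")], [("function_header", "h"), ("return_line", "r")]], 2, [some "c"], true)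

def Spec_process_problem_steps_py (sub_steps : List (List (String × String))) (num_steps : Int) (previous_llm_code : List (Option String)) (with_background : Bool) (out : String × String × String) : Prop := out = process_problem_steps_py_alt sub_steps num_steps previous_llm_code with_background
instance (sub_steps : List (List (String × String))) (num_steps : Int) (previous_llm_code : List (Option String)) (with_background : Bool) (out : String × String × String) : Decidable (Spec_process_problem_steps_py sub_steps num_steps previous_llm_code with_background out) := by unfold Spec_process_problem_steps_py; infer_instance

-- ===== CLAIM (what is proved, stated in full; the proofs are below) =====
def Claim_equal_process_problem_steps_py : Prop := ∀ (sub_steps : List (List (String × String))) (num_steps : Int) (previous_llm_code : List (Option String)) (with_background : Bool), Dom_process_problem_steps_py sub_steps num_steps previous_llm_code with_background → Pre_process_problem_steps_py sub_steps num_steps previous_llm_code with_background → Spec_process_problem_steps_py sub_steps num_steps previous_llm_code with_background (process_problem_steps_py sub_steps num_steps previous_llm_code with_background)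

-- ===== LEMMAS AND PROOFS =====

theorem pvWitness_ok : Dom_process_problem_steps_py pvWitness_process_problem_steps_py.1 pvWitness_process_problem_steps_py.2.1 pvWitness_process_problem_steps_py.2.2.1 pvWitness_process_problem_steps_py.2.2.2 ∧ Pre_process_problem_steps_py pvWitness_process_problem_steps_py.1 pvWitness_process_problem_steps_py.2.1 pvWitness_process_problem_steps_py.2.2.1 pvWitness_process_problem_steps_py.2.2.2 := by
  decide

-- characterisation of A's accumulating loop
theorem pvFoldChar (t c : Int → String) : ∀ (k : Nat) (acc : List String × List String),
    (PySem.List.pyRange 0 (k : Int) 1).foldl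
        (fun acc idx => (acc.1 ++ [t idx, c idx, "------"], acc.2 ++ [c idx])) acc
      = (acc.1 ++ (List.range k).flatMap (fun (i : Nat) => [t ((i : Nat) : Int), c ((i : Nat) : Int), "------"]),
         acc.2 ++ (List.range k).map (fun (i : Nat) => c ((i : Nat) : Int))) := by
  intro k
  induction k with
  | zero => intro acc; simp [PySem.List.pyRange_one_eq_nil]
  | succ k ih =>
      intro acc
      have hcast : ((k + 1 : Nat) : Int) = (k : Int) + 1 := by push_cast; ring
      rw [hcast, PySem.List.pyRange_one_succ_right (by positivity), List.foldl_append, ih]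
      simp [List.range_succ]

-- join helpers at String level
theorem pvJoinNil (sep : String) : PySem.Str.join sep [] = "" := by
  apply String.toList_inj.mp
  simp [PySem.Str.toList_join, PySem.Chars.join_nil]

theorem pvJoin1 (sep a : String) : PySem.Str.join sep [a] = a := by
  apply String.toList_inj.mp
  simp [PySem.Str.toList_join, PySem.Chars.join_singleton]

theorem pvJoinCons (sep a b : String) (t : List String) :
    PySem.Str.join sep (a :: b :: t) = a ++ sep ++ PySem.Str.join sep (b :: t) := by
  apply String.toList_inj.mp
  simp [PySem.Str.toList_join, PySem.Chars.join_cons_cons]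

theorem pvJoin2 (a b c : String) :
    PySem.Str.join "\n\n" [a, b ++ "\n\n" ++ c] = a ++ "\n\n" ++ b ++ "\n\n" ++ c := by
  apply String.toList_inj.mp
  simp [PySem.Str.toList_join, PySem.Chars.join_cons_cons, PySem.Chars.join_singleton]

-- B's recursion computes the two joined strings
theorem pvWalkChar (wb : Bool) : ∀ (steps : List (List (String × String))) (codes : List (Option String)),
    codes.length = steps.length →
    pvWalk steps codes wb =
      (PySem.Str.join "\n\n------\n\n" ((steps.zip (codes.map (fun c => c.getD ""))).map
          (fun sc => pvStepText sc.1 wb ++ "\n\n" ++ sc.2)),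
       PySem.Str.join "\n" (codes.map (fun c => c.getD ""))) := by
  intro steps
  induction steps with
  | nil =>
      intro codes h
      have : codes = [] := List.eq_nil_of_length_eq_zero h
      subst this
      simp [pvWalk, pvJoinNil]
  | cons s rest ih =>
      intro codes h
      cases codes with
      | nil => simp at h
      | cons c cs =>
          have hlen : cs.length = rest.length := by simpa using h
          cases rest with
          | nil =>
              have : cs = [] := List.eq_nil_of_length_eq_zero hlen
              subst this
              simp [pvWalk, pvJoin1, PySem.List.pyGet?, PySem.List.pyIdx?]
          | cons r rs =>
              have hcs : cs ≠ [] := by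
                intro hc; rw [hc] at hlen; simp at hlen
              obtain ⟨c', cs', rfl⟩ := List.exists_cons_of_ne_nil hcs
              have hrec := ih (c' :: cs') (by simpa using hlen)
              rw [show pvWalk (s :: r :: rs) (c :: c' :: cs') wb =
                  (pvStepText s wb ++ "\n\n" ++ (((PySem.List.pyGet? (c :: c' :: cs') 0).getD none).getD "") ++ "\n\n------\n\n" ++
                     (pvWalk (r :: rs) (PySem.List.slice (c :: c' :: cs') (some 1) none) wb).1,
                   (((PySem.List.pyGet? (c :: c' :: cs') 0).getD none).getD "") ++ "\n" ++
                     (pvWalk (r :: rs) (PySem.List.slice (c :: c' :: cs') (some 1) none) wb).2) from rfl]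
              rw [PySem.List.slice_from_one]
              simp only [List.tail_cons]
              rw [hrec]
              have h0 : (0 : Int) ≤ (cs'.length : Int) + 1 := by positivity
              simp [PySem.List.pyGet?, PySem.List.pyIdx?, pvJoinCons, h0]

-- A's loop body, named (definitionally equal to the lambda in the port)
def pvBody (ss : List (List (String × String))) (prev : List (Option String)) (wb : Bool)
    (acc : List String × List String) (idx : Int) : List String × List String :=
  (acc.1 ++ [pvStepText ((PySem.List.pyGet? ss idx).getD []) wb,
             ((PySem.List.pyGet? prev idx).getD none).getD "", "------"],
   acc.2 ++ [((PySem.List.pyGet? prev idx).getD none).getD ""])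

theorem pvFoldCharA (ss : List (List (String × String))) (prev : List (Option String)) (wb : Bool)
    (k : Nat) (acc : List String × List String) :
    (PySem.List.pyRange 0 (k : Int) 1).foldl (pvBody ss prev wb) acc
      = (acc.1 ++ (List.range k).flatMap (fun (i : Nat) =>
            [pvStepText ((PySem.List.pyGet? ss ((i : Nat) : Int)).getD []) wb,
             ((PySem.List.pyGet? prev ((i : Nat) : Int)).getD none).getD "", "------"]),
         acc.2 ++ (List.range k).map (fun (i : Nat) => ((PySem.List.pyGet? prev ((i : Nat) : Int)).getD none).getD "")) :=
  pvFoldChar _ _ k acc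

-- the join identity: interleaved lines with the trailing "------" dropped = blocks joined by sep++"------"++sep
theorem pvJoinBlocksChars (sep d : List Char) : ∀ (P : List (List Char × List Char)), P ≠ [] →
    PySem.Chars.join sep ((P.flatMap (fun p => [p.1, p.2, d])).dropLast)
      = PySem.Chars.join (sep ++ d ++ sep) (P.map (fun p => p.1 ++ sep ++ p.2)) := by
  intro P
  induction P with
  | nil => intro h; exact absurd rfl h
  | cons p rest ih =>
      intro _
      cases rest with
      | nil => simp [PySem.Chars.join_cons_cons, PySem.Chars.join_singleton]
      | cons q t =>
          have hflat : ((p :: q :: t).flatMap (fun p => [p.1, p.2, d])).dropLast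
              = p.1 :: p.2 :: d :: q.1 :: (q.2 :: d :: t.flatMap (fun p => [p.1, p.2, d])).dropLast := by
            simp [List.dropLast_cons₂]
          have hih := ih (by simp)
          have hflat2 : ((q :: t).flatMap (fun p => [p.1, p.2, d])).dropLast
              = q.1 :: (q.2 :: d :: t.flatMap (fun p => [p.1, p.2, d])).dropLast := by
            simp [List.dropLast_cons₂]
          rw [hflat2] at hih
          rw [hflat, PySem.Chars.join_cons_cons, PySem.Chars.join_cons_cons,
              PySem.Chars.join_cons_cons, hih]
          simp [PySem.Chars.join_cons_cons, List.append_assoc]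

theorem pvJoinBlocksStr (P : List (String × String)) :
    (if P.flatMap (fun p => [p.1, p.2, "------"]) ≠ [] then
        PySem.Str.join "\n\n" ((P.flatMap (fun p => [p.1, p.2, "------"])).dropLast)
      else "")
      = PySem.Str.join "\n\n------\n\n" (P.map (fun p => p.1 ++ "\n\n" ++ p.2)) := by
  cases P with
  | nil =>
      simp only [List.flatMap_nil, ne_eq, not_true_eq_false, if_false, List.map_nil]
      apply String.toList_inj.mp
      simp [PySem.Str.toList_join, PySem.Chars.join_nil]
  | cons p rest =>
      rw [if_pos (by simp)]
      apply String.toList_inj.mp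
      rw [PySem.Str.toList_join, PySem.Str.toList_join]
      have h := pvJoinBlocksChars "\n\n".toList "------".toList
        ((p :: rest).map (fun q => (q.1.toList, q.2.toList))) (by simp)
      have hL : ((p :: rest).map (fun q => (q.1.toList, q.2.toList))).flatMap
            (fun p => [p.1, p.2, "------".toList])
          = ((p :: rest).flatMap (fun p => [p.1, p.2, "------"])).map String.toList := by
        simp [List.flatMap_map, List.map_flatMap]
      have hsep : ("\n\n------\n\n" : String).toList
          = "\n\n".toList ++ "------".toList ++ "\n\n".toList := by decide
      have hR : List.map String.toList ((p :: rest).map (fun p => p.1 ++ "\n\n" ++ p.2))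
          = ((p :: rest).map (fun q => (q.1.toList, q.2.toList))).map
              (fun p => p.1 ++ "\n\n".toList ++ p.2) := by
        simp
      rw [List.map_dropLast, ← hL, hsep, hR]
      exact h

-- ===== VERDICT (by name: the statement is the Claim_ definition above) =====

theorem process_problem_steps_py_spec : Claim_equal_process_problem_steps_py := by
  intro ss n prev wb _ hpre
  unfold Spec_process_problem_steps_py
  obtain ⟨h1, h2⟩ := hpre
  -- rewrite A into its named-body normal form (definitional)
  have hA : process_problem_steps_py ss n prev wb =
      ((if ((PySem.List.pyRange 0 (n - 1) 1).foldl (pvBody ss prev wb) ([], [])).1 ≠ [] then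
          PySem.Str.join "\n\n"
            (PySem.List.slice ((PySem.List.pyRange 0 (n - 1) 1).foldl (pvBody ss prev wb) ([], [])).1
              none (some (-1)))
        else ""),
       PySem.Str.join "\n\n"
         [pvStepText ((PySem.List.pyGet? ss (n - 1)).getD []) wb,
          PySem.Dict.getD (PySem.Dict.mk ((PySem.List.pyGet? ss (n - 1)).getD [])) "function_header" "" ++
            "\n\n" ++
            PySem.Dict.getD (PySem.Dict.mk ((PySem.List.pyGet? ss (n - 1)).getD [])) "return_line" ""],
       PySem.Str.join "\n" ((PySem.List.pyRange 0 (n - 1) 1).foldl (pvBody ss prev wb) ([], [])).2) := rfl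
  rw [hA]
  by_cases hn : 1 ≤ n
  · obtain ⟨hs, hp⟩ := h1 hn
    have hk : (((n - 1).toNat : Nat) : Int) = n - 1 := by omega
    have hks : (n - 1).toNat < ss.length := by omega
    have hkp : (n - 1).toNat ≤ prev.length := by omega
    set k := (n - 1).toNat with hkdef
    simp only [process_problem_steps_py_alt]
    rw [← hk]
    have hif : (if ((k : Int)) < 0 then (0 : Int) else (k : Int)) = (k : Int) := by omega
    rw [pvFoldCharA, hif]
    have hsl : ∀ {α : Type} (xs : List α), PySem.List.slice xs none (some (k : Int)) = xs.take k := by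
      intro α xs
      rw [PySem.List.slice_to xs (by positivity)]
      simp
    have hwalk := pvWalkChar wb (ss.take k) (prev.take k)
      (by simp [hkp, Nat.le_of_lt hks])
    have hcodes : (List.take k prev).map (fun c => c.getD "")
        = (List.range k).map (fun (i : Nat) => ((PySem.List.pyGet? prev ((i : Nat) : Int)).getD none).getD "") := by
      apply List.ext_getElem
      · simp [hkp]
      · intro i h1' h2'
        have hi : i < k := by simpa [hkp] using h1'
        have hip : i < prev.length := by omega
        simp [List.getElem_take, PySem.List.pyGet?_natCast, hip]
    have hblocks : ((List.take k ss).zip ((List.take k prev).map (fun c => c.getD ""))).map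
          (fun sc => pvStepText sc.1 wb ++ "\n\n" ++ sc.2)
        = (List.range k).map (fun (i : Nat) =>
            pvStepText ((PySem.List.pyGet? ss ((i : Nat) : Int)).getD []) wb ++ "\n\n" ++
              ((PySem.List.pyGet? prev ((i : Nat) : Int)).getD none).getD "") := by
      apply List.ext_getElem
      · simp [hkp]; omega
      · intro i h1' h2'
        have hi : i < k := by simpa using h2'
        have hip : i < prev.length := by omega
        have his : i < ss.length := by omega
        simp [List.getElem_zip, List.getElem_take, PySem.List.pyGet?_natCast, hip, his]
    rw [hsl ss, hsl prev, hwalk]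
    simp only [List.nil_append, Prod.mk.injEq]
    refine ⟨?_, ?_, ?_⟩
    · -- output_str component
      have hP := pvJoinBlocksStr ((List.range k).map (fun (i : Nat) =>
          (pvStepText ((PySem.List.pyGet? ss ((i : Nat) : Int)).getD []) wb,
           ((PySem.List.pyGet? prev ((i : Nat) : Int)).getD none).getD "")))
      simp only [List.flatMap_map, List.map_map] at hP
      rw [PySem.List.slice_to_neg_one]
      rw [hblocks]
      exact hP
    · -- next_step component
      exact pvJoin2 _ _ _
    · -- previous_code component
      rw [hcodes]
  · -- num_steps ≤ 0: the loop is empty, the current step is a negative index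
    have hr : PySem.List.pyRange 0 (n - 1) 1 = [] := PySem.List.pyRange_one_eq_nil (by omega)
    have hif : (if n - 1 < 0 then (0 : Int) else n - 1) = (0 : Int) := by omega
    simp only [process_problem_steps_py_alt]
    rw [hr, hif]
    have hsl : ∀ {α : Type} (xs : List α), PySem.List.slice xs none (some (0 : Int)) = [] := by
      intro α xs
      rw [PySem.List.slice_to xs le_rfl]
      simp
    rw [hsl, hsl]
    refine Prod.ext ?_ (Prod.ext ?_ ?_)
    · simp [pvWalk]
    · exact pvJoin2 _ _ _
    · simp [pvWalk, pvJoinNil]
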